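-- pv_equiv track=rewrite | github.com/daveyboyc/cmr | checker/management/commands/build_location_groups_cache.py | normalize_location_local
-- ===== SOURCE A (Python) =====
-- def normalize_location_local(loc):
--     """Normalize location for consistent grouping."""
--     if not loc:
--         return ""
--
--     # Convert to lowercase and strip whitespace
--     norm = str(loc).lower().strip()
--
--     # Simple replacements instead of regex
--     norm = norm.replace(',', ' ')
--     norm = norm.replace('.', ' ')
--     norm = norm.replace('-', ' ')
--     norm = norm.replace('_', ' ')
--     norm = norm.replace('/', ' ')
--     norm = norm.replace('\\\\', ' ') # Ensure backslashes are handled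
--
--     # Replace multiple spaces with single space
--     while '  ' in norm:
--         norm = norm.replace('  ', ' ')
--
--     # REMOVED SPECIAL CASE:
--     # if "energy centre" in norm and "mosley" in norm:
--     #     return "energy centre lower mosley street"
--
--     return norm
-- ===== SOURCE B (Python) =====
-- def normalize_location_local(loc):
--     """Normalize location for consistent grouping (single pass over the string)."""
--     if not loc:
--         return ""
--     s = str(loc).lower().strip()
--     out = []
--     i = 0
--     n = len(s)
--     while i < n:
--         c = s[i]
--         if c == '\\' and i + 1 < n and s[i + 1] == '\\':
--             c = ' '
--             i += 2
--         elif c in ',.-_/':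
--             c = ' '
--             i += 1
--         else:
--             i += 1
--         if c == ' ' and out and out[-1] == ' ':
--             continue
--         out.append(c)
--     return ''.join(out)
-- ===== Notes on version B (the rewrite author's own statement) =====
-- stated objective: alternative
-- what changed: A's six sequential str.replace passes plus the repeated double-space collapsing while-loop are fused into one left-to-right character pass that maps separators to spaces and skips a space whenever the last emitted character is already a space.
import Mathlib
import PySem

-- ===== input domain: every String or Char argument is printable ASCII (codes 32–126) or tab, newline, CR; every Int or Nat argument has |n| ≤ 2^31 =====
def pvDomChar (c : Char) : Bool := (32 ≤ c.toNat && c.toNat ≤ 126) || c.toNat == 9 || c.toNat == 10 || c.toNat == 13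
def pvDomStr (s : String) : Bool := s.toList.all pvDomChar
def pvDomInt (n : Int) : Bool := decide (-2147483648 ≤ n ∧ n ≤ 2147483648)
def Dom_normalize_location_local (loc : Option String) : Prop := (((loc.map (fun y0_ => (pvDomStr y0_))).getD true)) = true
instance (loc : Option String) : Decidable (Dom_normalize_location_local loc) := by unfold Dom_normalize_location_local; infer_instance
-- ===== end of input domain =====

-- B replaces A's six sequential str.replace passes plus the repeated double-space
-- collapsing loop by ONE left-to-right pass that maps separators to ' ' and skips a
-- space whose previously emitted character is already a space.

-- ===== PORT A =====

-- A-side helpers: a structural characterisation of Python's str.replace (replSpec),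
-- its specialisation to '  ' -> ' ' (s2), and the length lemma that collapseA's
-- decreasing_by cites.
def replSpec (old new : List Char) : List Char → List Char
  | [] => []
  | c :: t =>
    if old.isPrefixOf (c :: t) then new ++ replSpec old new (t.drop (old.length - 1))
    else c :: replSpec old new t
termination_by l => l.length
decreasing_by
  · simp only [List.length_drop, List.length_cons]; omega
  · simp

def s2 : List Char → List Char
  | ' ' :: ' ' :: t => ' ' :: s2 t
  | c :: t => c :: s2 t
  | [] => []

lemma go_eq_replSpec (old new : List Char) (hold : old ≠ []) :
    ∀ fuel l acc, l.length ≤ fuel →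
      PySem.Chars.replace.go old new fuel l acc = acc.reverse ++ replSpec old new l := by
  intro fuel
  induction fuel using Nat.strong_induction_on with
  | _ fuel ih =>
    intro l acc hlen
    match fuel, l with
    | 0, l =>
      have : l = [] := List.eq_nil_of_length_eq_zero (Nat.le_zero.mp hlen)
      subst this
      simp [PySem.Chars.replace.go, replSpec]
    | fuel+1, [] =>
      simp [PySem.Chars.replace.go, replSpec]
    | fuel+1, c :: t =>
      obtain ⟨o, os, rfl⟩ : ∃ o os, old = o :: os := by
        cases old with
        | nil => exact absurd rfl hold
        | cons o os => exact ⟨o, os, rfl⟩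
      have hlen' : t.length ≤ fuel := by simpa using hlen
      rw [PySem.Chars.replace.go]
      by_cases hp : (o :: os).isPrefixOf (c :: t)
      · have hdrop : List.drop (o :: os).length (c :: t) = t.drop ((o :: os).length - 1) := by
          simp
        have hlen2 : (t.drop ((o :: os).length - 1)).length ≤ fuel := by
          simp only [List.length_drop]; omega
        rw [if_pos hp, hdrop, ih fuel (by omega) _ _ hlen2]
        rw [replSpec, if_pos hp]
        simp
      · rw [if_neg hp, ih fuel (by omega) t (c :: acc) hlen']
        rw [replSpec, if_neg hp]
        simp

lemma replace_eq_replSpec (s old new : List Char) (hold : old ≠ []) :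
    PySem.Chars.replace s old new = replSpec old new s := by
  rw [PySem.Chars.replace]
  simp only [List.isEmpty_iff]
  rw [if_neg hold, go_eq_replSpec old new hold s.length s [] (le_refl _)]
  simp

lemma replSpec_eq_s2 : ∀ l, replSpec [' ', ' '] [' '] l = s2 l := by
  intro l
  induction l using s2.induct with
  | case1 t ih =>
    rw [replSpec, if_pos (by simp [List.isPrefixOf]), s2]
    simp [ih]
  | case2 c t h ih =>
    have hp : ¬ ([' ', ' '].isPrefixOf (c :: t) = true) := by
      intro hp
      obtain ⟨r, hr⟩ := List.isPrefixOf_iff_prefix.mp hp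
      simp at hr
      exact h r hr.1.symm hr.2.symm
    rw [replSpec, if_neg hp, ih, s2]
    exact h
  | case3 => rw [replSpec, s2]

lemma s2_length_le : ∀ l : List Char, (s2 l).length ≤ l.length := by
  intro l
  induction l using s2.induct with
  | case1 t ih => rw [s2]; simp only [List.length_cons]; omega
  | case2 c t h ih =>
    rw [s2]
    · simp only [List.length_cons]; omega
    · exact h
  | case3 => rw [s2]

lemma s2_length_lt (l : List Char) (h : [' ', ' '] <:+: l) : (s2 l).length < l.length := by
  induction l using s2.induct with
  | case1 t ih =>
    rw [s2]; simp only [List.length_cons]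
    have := s2_length_le t; omega
  | case2 c t hne ih =>
    rcases List.infix_cons_iff.mp h with hp | hi
    · obtain ⟨r, hr⟩ := hp
      simp at hr
      exact (hne r hr.1.symm hr.2.symm).elim
    · rw [s2]
      · simp only [List.length_cons]; exact Nat.succ_lt_succ (ih hi)
      · exact hne
  | case3 => simp at h

-- A's while loop: while '  ' in norm: norm = norm.replace('  ', ' ')
def collapseA (l : List Char) : List Char :=
  if h : PySem.Chars.isIn [' ', ' '] l = true then
    collapseA (PySem.Chars.replace l [' ', ' '] [' '])
  else l
termination_by l.length
decreasing_by
  rw [replace_eq_replSpec _ _ _ (by simp), replSpec_eq_s2]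
  exact s2_length_lt l ((PySem.Chars.isIn_iff_infix _ _).mp h)

def normalize_location_local (loc : Option String) : String :=
  match loc with
  | none => ""
  | some s =>
    if s.toList.isEmpty then ""
    else
      let n0 := PySem.Chars.strip (PySem.Chars.lower s.toList)
      let n1 := PySem.Chars.replace n0 [','] [' ']
      let n2 := PySem.Chars.replace n1 ['.'] [' ']
      let n3 := PySem.Chars.replace n2 ['-'] [' ']
      let n4 := PySem.Chars.replace n3 ['_'] [' ']
      let n5 := PySem.Chars.replace n4 ['/'] [' ']
      let n6 := PySem.Chars.replace n5 ['\\', '\\'] [' ']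
      String.ofList (collapseA n6)

-- ===== PORT B =====

def bGo : List Char → List Char → List Char
  | acc, [] => acc.reverse
  | acc, '\\' :: '\\' :: t =>
    if acc.head? = some ' ' then bGo acc t else bGo (' ' :: acc) t
  | acc, c :: t =>
    let d := if c = ',' ∨ c = '.' ∨ c = '-' ∨ c = '_' ∨ c = '/' then ' ' else c
    if d = ' ' ∧ acc.head? = some ' ' then bGo acc t else bGo (d :: acc) t

def normalize_location_local_alt (loc : Option String) : String :=
  match loc with
  | none => ""
  | some s =>
    if s.toList.isEmpty then ""
    else String.ofList (bGo [] (PySem.Chars.strip (PySem.Chars.lower s.toList)))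

-- ===== PRECONDITION & SPEC =====
def Spec_normalize_location_local (loc : Option String) (out : String) : Prop := out = normalize_location_local_alt loc
instance (loc : Option String) (out : String) : Decidable (Spec_normalize_location_local loc out) := by unfold Spec_normalize_location_local; infer_instance

-- ===== CLAIM (what is proved, stated in full; the proofs are below) =====
def Claim_equal_normalize_location_local : Prop := ∀ (loc : Option String), Dom_normalize_location_local loc → Spec_normalize_location_local loc (normalize_location_local loc)

-- ===== LEMMAS AND PROOFS =====

-- the combined effect of the five single-character replaces
def fmap (a : Char) : Char :=
  if a = ',' ∨ a = '.' ∨ a = '-' ∨ a = '_' ∨ a = '/' then ' ' else a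

-- one pass of norm.replace('\\\\', ' ')
def bb : List Char → List Char
  | '\\' :: '\\' :: t => ' ' :: bb t
  | c :: t => c :: bb t
  | [] => []

-- collapse runs of spaces; b = "last emitted char was a space"
def cr (b : Bool) : List Char → List Char
  | [] => []
  | c :: t => if c = ' ' then (if b then cr true t else ' ' :: cr true t) else c :: cr false t

lemma cr_cons_space (b : Bool) (x : List Char) :
    cr b (' ' :: x) = if b then cr true x else ' ' :: cr true x := by
  rw [cr]; simp

lemma cr_cons_ne (b : Bool) (c : Char) (x : List Char) (h : ¬ c = ' ') :
    cr b (c :: x) = c :: cr false x := by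
  rw [cr, if_neg h]

lemma replSpec_single (c : Char) :
    ∀ l, replSpec [c] [' '] l = l.map (fun a => if a = c then ' ' else a) := by
  intro l
  induction l with
  | nil => rw [replSpec]; simp
  | cons a t ih =>
    rw [replSpec]
    by_cases h : a = c
    · rw [if_pos (by simp [List.isPrefixOf, h])]
      simp [h, ih]
    · rw [if_neg (by simp [List.isPrefixOf]; exact fun hc => absurd hc.symm h)]
      simp [h, ih]

lemma replSpec_bb : ∀ l, replSpec ['\\', '\\'] [' '] l = bb l := by
  intro l
  induction l using bb.induct with
  | case1 t ih =>
    rw [replSpec, if_pos (by simp [List.isPrefixOf]), bb]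
    simp [ih]
  | case2 c t h ih =>
    have hp : ¬ (['\\', '\\'].isPrefixOf (c :: t) = true) := by
      intro hp
      obtain ⟨r, hr⟩ := List.isPrefixOf_iff_prefix.mp hp
      simp at hr
      exact h r hr.1.symm hr.2.symm
    rw [replSpec, if_neg hp, ih, bb]
    exact h
  | case3 => rw [replSpec, bb]

lemma bb_cons (c : Char) (t : List Char) (h : ¬ (c = '\\' ∧ t.head? = some '\\')) :
    bb (c :: t) = c :: bb t := by
  rw [bb]
  intro t' hc ht
  exact h ⟨hc, by simp [ht]⟩

lemma cr_of_head_ne (b b' : Bool) : ∀ l : List Char, l.head? ≠ some ' ' → cr b l = cr b' l := by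
  intro l h
  cases l with
  | nil => rw [cr, cr]
  | cons c t =>
    have hc : ¬ c = ' ' := fun hc => h (by simp [hc])
    rw [cr_cons_ne, cr_cons_ne] <;> exact hc

lemma cr_s2 : ∀ l (b : Bool), cr b (s2 l) = cr b l := by
  intro l
  induction l using s2.induct with
  | case1 t ih =>
    intro b
    rw [s2, cr_cons_space, cr_cons_space, cr_cons_space]
    simp [ih]
  | case2 c t h ih =>
    intro b
    rw [s2]
    · by_cases hc : c = ' '
      · subst hc
        rw [cr_cons_space, cr_cons_space, ih true]
      · rw [cr_cons_ne _ _ _ hc, cr_cons_ne _ _ _ hc, ih false]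
    · exact h
  | case3 => intro b; rw [s2]

lemma cr_fix : ∀ l : List Char, ¬ ([' ', ' '] <:+: l) → cr false l = l := by
  intro l
  induction l with
  | nil => intro _; rw [cr]
  | cons c t ih =>
    intro h
    have hti : ¬ ([' ', ' '] <:+: t) := fun hi => h (List.infix_cons_iff.mpr (Or.inr hi))
    by_cases hc : c = ' '
    · subst hc
      have hth : t.head? ≠ some ' ' := by
        intro hh
        cases t with
        | nil => simp at hh
        | cons d r =>
          simp at hh
          exact h (List.infix_cons_iff.mpr (Or.inl ⟨r, by simp [hh]⟩))
      rw [cr_cons_space]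
      simp only [Bool.false_eq_true, if_false]
      rw [cr_of_head_ne true false t hth, ih hti]
    · rw [cr_cons_ne _ _ _ hc, ih hti]

lemma collapseA_eq_cr : ∀ l, collapseA l = cr false l := by
  intro l
  induction l using collapseA.induct with
  | case1 l h ih =>
    rw [collapseA, dif_pos h, ih,
        replace_eq_replSpec _ _ _ (by simp), replSpec_eq_s2, cr_s2]
  | case2 l h =>
    rw [collapseA, dif_neg h,
        cr_fix l ((PySem.Chars.isIn_eq_false_iff _ _).mp (by simpa using h))]

lemma fmap_eq_backslash (a : Char) (h : fmap a = '\\') : a = '\\' := by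
  unfold fmap at h
  split at h
  · exact absurd h (by decide)
  · exact h

lemma bGo_eq : ∀ acc u, bGo acc u = acc.reverse ++ cr (decide (acc.head? = some ' ')) (bb (u.map fmap)) := by
  intro acc u
  induction acc, u using bGo.induct with
  | case1 acc => rw [bGo]; simp [bb, cr]
  | case2 acc t h1 ih =>
    rw [bGo, if_pos h1]
    have hm : (('\\' :: '\\' :: t).map fmap) = '\\' :: '\\' :: t.map fmap := by
      simp [fmap]
    rw [hm, bb, ih, cr_cons_space]
    simp [h1]
  | case3 acc t h1 ih =>
    rw [bGo, if_neg h1]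
    have hm : (('\\' :: '\\' :: t).map fmap) = '\\' :: '\\' :: t.map fmap := by
      simp [fmap]
    rw [hm, bb, ih, cr_cons_space]
    simp [h1]
  | case4 acc c t hne d h1 ih =>
    have h1' : (if c = ',' ∨ c = '.' ∨ c = '-' ∨ c = '_' ∨ c = '/' then ' ' else c) = ' '
        ∧ acc.head? = some ' ' := h1
    have hfc : fmap c = ' ' := by unfold fmap; exact h1'.1
    have hnb : ¬ (c = '\\' ∧ t.head? = some '\\') := by
      rintro ⟨rfl, hh⟩
      cases t with
      | nil => simp at hh
      | cons d r =>
        simp at hh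
        exact hne r rfl (by rw [hh])
    have hbb : bb ((c :: t).map fmap) = ' ' :: bb (t.map fmap) := by
      rw [List.map_cons, bb_cons, hfc]
      rintro ⟨hfcb, hh⟩
      apply hnb
      refine ⟨fmap_eq_backslash c hfcb, ?_⟩
      cases t with
      | nil => simp at hh
      | cons d r =>
        simp at hh
        simp [fmap_eq_backslash d hh]
    rw [bGo, if_pos h1, ih, hbb, cr_cons_space]
    simp [h1'.2]
    exact hne
  | case5 acc c t hne d h1 ih =>
    have h1' : ¬ ((if c = ',' ∨ c = '.' ∨ c = '-' ∨ c = '_' ∨ c = '/' then ' ' else c) = ' '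
        ∧ acc.head? = some ' ') := h1
    have hnb : ¬ (c = '\\' ∧ t.head? = some '\\') := by
      rintro ⟨rfl, hh⟩
      cases t with
      | nil => simp at hh
      | cons d r =>
        simp at hh
        exact hne r rfl (by rw [hh])
    have hbb : bb ((c :: t).map fmap) = fmap c :: bb (t.map fmap) := by
      rw [List.map_cons, bb_cons]
      rintro ⟨hfcb, hh⟩
      apply hnb
      refine ⟨fmap_eq_backslash c hfcb, ?_⟩
      cases t with
      | nil => simp at hh
      | cons d r =>
        simp at hh
        simp [fmap_eq_backslash d hh]
    have hdd : d = fmap c := rfl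
    rw [bGo, if_neg h1, ih, hbb]
    by_cases hd : fmap c = ' '
    · have hacc : ¬ (acc.head? = some ' ') := by
        intro hh
        exact h1' ⟨by unfold fmap at hd; exact hd, hh⟩
      rw [hd, cr_cons_space]
      simp [hdd, hacc, hd]
    · rw [cr_cons_ne _ _ _ hd]
      simp [hdd, hd]
    exact hne

lemma map5_eq_fmap (u : List Char) :
    ((((u.map (fun a => if a = ',' then ' ' else a)).map
        (fun a => if a = '.' then ' ' else a)).map
        (fun a => if a = '-' then ' ' else a)).map
        (fun a => if a = '_' then ' ' else a)).map
        (fun a => if a = '/' then ' ' else a) = u.map fmap := by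
  simp only [List.map_map]
  congr 1
  funext a
  by_cases h1 : a = ','
  · subst h1; decide
  by_cases h2 : a = '.'
  · subst h2; decide
  by_cases h3 : a = '-'
  · subst h3; decide
  by_cases h4 : a = '_'
  · subst h4; decide
  by_cases h5 : a = '/'
  · subst h5; decide
  simp [Function.comp, fmap, h1, h2, h3, h4, h5]

lemma pipeline_eq (u : List Char) :
    collapseA (PySem.Chars.replace
      (PySem.Chars.replace
        (PySem.Chars.replace
          (PySem.Chars.replace
            (PySem.Chars.replace
              (PySem.Chars.replace u [','] [' '])
              ['.'] [' '])
            ['-'] [' '])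
          ['_'] [' '])
        ['/'] [' '])
      ['\\', '\\'] [' ']) = bGo [] u := by
  have e1 : ∀ (s : List Char) (c : Char),
      PySem.Chars.replace s [c] [' '] = s.map (fun a => if a = c then ' ' else a) := fun s c => by
    rw [replace_eq_replSpec _ _ _ (by simp), replSpec_single]
  have e2 : ∀ s : List Char, PySem.Chars.replace s ['\\', '\\'] [' '] = bb s := fun s => by
    rw [replace_eq_replSpec _ _ _ (by simp), replSpec_bb]
  rw [e1, e1, e1, e1, e1, e2, map5_eq_fmap, collapseA_eq_cr, bGo_eq]
  simp

-- ===== VERDICT (by name: the statement is the Claim_ definition above) =====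
theorem normalize_location_local_spec : Claim_equal_normalize_location_local := by
  intro loc _
  unfold Spec_normalize_location_local normalize_location_local normalize_location_local_alt
  cases loc with
  | none => rfl
  | some s =>
    by_cases he : s.toList.isEmpty
    · simp [he]
    · simp only [he, Bool.false_eq_true, if_false]
      rw [pipeline_eq]
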